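-- pv_equiv track=rewrite | github.com/pypi-data/pypi-mirror-396 | packages/python-spartan/python_spartan-0.3.8.tar.gz/python_spartan-0.3.8/spartan/services/handler.py | _get_env_changes_summary
-- ===== SOURCE A (Python) =====
-- def _get_env_changes_summary(
--     current_vars: dict, final_vars: dict, overwrite: bool
-- ) -> dict:
--     """Get summary of environment variable changes."""
--     new_vars = len([k for k in final_vars if k not in current_vars])
--     updated_vars = len(
--         [
--             k
--             for k in final_vars
--             if k in current_vars and current_vars[k] != final_vars[k]
--         ]
--     )
--
--     if overwrite:
--         deleted_vars = len([k for k in current_vars if k not in final_vars])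
--     else:
--         deleted_vars = 0
--
--     return {
--         "new": new_vars,
--         "updated": updated_vars,
--         "deleted": deleted_vars,
--         "total_changes": new_vars + updated_vars + deleted_vars,
--     }
-- ===== SOURCE B (Python) =====
-- def _get_env_changes_summary(
--     current_vars: dict, final_vars: dict, overwrite: bool
-- ) -> dict:
--     """Get summary of environment variable changes.
--
--     Single pass over current_vars: tally removed and updated keys directly,
--     then derive the number of new keys arithmetically:
--     new = len(final) - common, where common = len(current) - removed.
--     """
--     removed = 0
--     updated = 0
--     for k, v in current_vars.items():
--         if k not in final_vars:
--             removed += 1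
--         elif final_vars[k] != v:
--             updated += 1
--     new_vars = len(final_vars) - (len(current_vars) - removed)
--     deleted_vars = removed if overwrite else 0
--     return {
--         "new": new_vars,
--         "updated": updated,
--         "deleted": deleted_vars,
--         "total_changes": new_vars + updated + deleted_vars,
--     }
-- ===== Notes on version B (the rewrite author's own statement) =====
-- stated objective: alternative
-- what changed: A scans the final dict twice and the current dict once with membership comprehensions; B makes one accumulator pass over current_vars only (counting removed and updated in-line) and derives the new-key count arithmetically as len(final) - (len(current) - removed).
import Mathlib
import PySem

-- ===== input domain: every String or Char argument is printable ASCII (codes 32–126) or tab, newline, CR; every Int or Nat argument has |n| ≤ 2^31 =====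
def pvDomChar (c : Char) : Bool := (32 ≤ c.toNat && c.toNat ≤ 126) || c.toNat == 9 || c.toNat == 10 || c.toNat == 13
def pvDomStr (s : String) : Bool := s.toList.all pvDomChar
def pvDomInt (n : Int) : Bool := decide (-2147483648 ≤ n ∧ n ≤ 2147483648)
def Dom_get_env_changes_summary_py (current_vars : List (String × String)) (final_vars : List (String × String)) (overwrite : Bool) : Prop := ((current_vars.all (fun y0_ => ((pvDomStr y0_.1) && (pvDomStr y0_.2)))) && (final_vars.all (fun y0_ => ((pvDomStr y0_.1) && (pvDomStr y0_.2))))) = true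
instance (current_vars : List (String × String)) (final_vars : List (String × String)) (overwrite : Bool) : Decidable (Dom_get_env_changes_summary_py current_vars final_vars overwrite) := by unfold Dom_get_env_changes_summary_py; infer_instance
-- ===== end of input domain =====

-- B replaces A's three membership comprehensions by a single accumulator pass over
-- current_vars plus arithmetic for the new-key count; return value only, no mutation.

-- ===== PORT A =====
-- Literal transliteration of A: three list comprehensions over the dicts' keys.
-- current_vars[k] / final_vars[k] are read as getD with default "" — exact here, since in the
-- only branch that reads them 'k' is a key of both dicts.
def get_env_changes_summary_py (current_vars : List (String × String)) (final_vars : List (String × String)) (overwrite : Bool) : List (String × Int) :=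
  let current_d := PySem.Dict.mk current_vars
  let final_d := PySem.Dict.mk final_vars
  let new_vars : Int := ((final_d.keys.filter (fun k => !(current_d.contains k))).length : Int)
  let updated_vars : Int :=
    ((final_d.keys.filter (fun k =>
        current_d.contains k && !(current_d.getD k "" == final_d.getD k ""))).length : Int)
  let deleted_vars : Int :=
    if overwrite then ((current_d.keys.filter (fun k => !(final_d.contains k))).length : Int) else 0
  [("new", new_vars), ("updated", updated_vars), ("deleted", deleted_vars),
   ("total_changes", new_vars + updated_vars + deleted_vars)]

-- ===== PORT B =====
-- Transliteration of Source B: one fold over current_vars.items() accumulating (removed, updated),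
-- then new = len(final) - (len(current) - removed).
def get_env_changes_summary_py_alt (current_vars : List (String × String)) (final_vars : List (String × String)) (overwrite : Bool) : List (String × Int) :=
  let final_d := PySem.Dict.mk final_vars
  let ru : Int × Int :=
    current_vars.foldl (fun acc kv =>
      if !(final_d.contains kv.1) then (acc.1 + 1, acc.2)
      else if !(final_d.getD kv.1 "" == kv.2) then (acc.1, acc.2 + 1)
      else acc) (0, 0)
  let new_vars : Int := (final_vars.length : Int) - ((current_vars.length : Int) - ru.1)
  let deleted_vars : Int := if overwrite then ru.1 else 0
  [("new", new_vars), ("updated", ru.2), ("deleted", deleted_vars),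
   ("total_changes", new_vars + ru.2 + deleted_vars)]

-- ===== PRECONDITION & SPEC =====
-- Pre_ only states that the association lists really represent Python dicts (no duplicate
-- keys) — every input A accepts is a pair of dicts, so nothing A returns on is excluded.
def Pre_get_env_changes_summary_py (current_vars : List (String × String)) (final_vars : List (String × String)) (overwrite : Bool) : Prop :=
  (current_vars.map Prod.fst).Nodup ∧ (final_vars.map Prod.fst).Nodup
instance (current_vars : List (String × String)) (final_vars : List (String × String)) (overwrite : Bool) : Decidable (Pre_get_env_changes_summary_py current_vars final_vars overwrite) := by unfold Pre_get_env_changes_summary_py; infer_instance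

def pvWitness_get_env_changes_summary_py : (List (String × String)) × (List (String × String)) × Bool :=
  ([("A", "1"), ("B", "2")], [("B", "9"), ("C", "3")], true)

def Spec_get_env_changes_summary_py (current_vars : List (String × String)) (final_vars : List (String × String)) (overwrite : Bool) (out : List (String × Int)) : Prop := out = get_env_changes_summary_py_alt current_vars final_vars overwrite
instance (current_vars : List (String × String)) (final_vars : List (String × String)) (overwrite : Bool) (out : List (String × Int)) : Decidable (Spec_get_env_changes_summary_py current_vars final_vars overwrite out) := by unfold Spec_get_env_changes_summary_py; infer_instance

-- ===== CLAIM (what is proved, stated in full; the proofs are below) =====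
def Claim_equal_get_env_changes_summary_py : Prop := ∀ (current_vars : List (String × String)) (final_vars : List (String × String)) (overwrite : Bool), Dom_get_env_changes_summary_py current_vars final_vars overwrite → Pre_get_env_changes_summary_py current_vars final_vars overwrite → Spec_get_env_changes_summary_py current_vars final_vars overwrite (get_env_changes_summary_py current_vars final_vars overwrite)

-- ===== LEMMAS AND PROOFS =====

-- Dict membership in a literal dict is list membership of the key among the first components.
theorem contains_mk_eq (ps : List (String × String)) (k : String) :
    (PySem.Dict.mk ps).contains k = decide (k ∈ ps.map Prod.fst) := by
  simp only [PySem.Dict.contains_mk]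
  rw [Bool.eq_iff_iff]
  constructor
  · intro h
    obtain ⟨p, hp, he⟩ := List.any_eq_true.mp h
    simp only [decide_eq_true_iff]
    exact List.mem_map.mpr ⟨p, hp, eq_of_beq he⟩
  · intro h
    obtain ⟨p, hp, he⟩ := List.mem_map.mp (decide_eq_true_iff.mp h)
    exact List.any_eq_true.mpr ⟨p, hp, by simp [he]⟩

-- B's fold accumulates exactly the two filter counts.
theorem foldl_tally (fd : PySem.Dict String String) (c : List (String × String)) (a b : Int) :
    c.foldl (fun acc kv =>
      if !(fd.contains kv.1) then (acc.1 + 1, acc.2)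
      else if !(fd.getD kv.1 "" == kv.2) then (acc.1, acc.2 + 1)
      else acc) (a, b)
    = (a + ((c.filter (fun kv => !(fd.contains kv.1))).length : Int),
       b + ((c.filter (fun kv => fd.contains kv.1 && !(fd.getD kv.1 "" == kv.2))).length : Int)) := by
  induction c generalizing a b with
  | nil => simp
  | cons kv rest ih =>
    simp only [List.foldl_cons, List.filter_cons]
    by_cases h1 : (!fd.contains kv.1) = true
    · rw [if_pos h1, ih]
      have h1' : fd.contains kv.1 = false := by simpa using h1
      simp [h1']
      omega
    · rw [if_neg h1]
      by_cases h2 : (!fd.getD kv.1 "" == kv.2) = true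
      · rw [if_pos h2, ih]
        simp only [Bool.not_eq_true', Bool.not_eq_false] at h1
        simp [h1, h2]
        omega
      · rw [if_neg h2, ih]
        simp only [Bool.not_eq_true', Bool.not_eq_false] at h1 h2
        simp [h1, h2]

-- Counting pairs by a predicate on the key = counting keys.
theorem length_filter_fst (l : List (String × String)) (p : String → Bool) :
    (l.filter (fun kv => p kv.1)).length = ((l.map Prod.fst).filter p).length := by
  rw [List.filter_map, List.length_map]
  simp only [Function.comp_def]

-- Two nodup key lists filtered to the same membership set have equal length.
theorem length_filter_eq_of_nodup {l1 l2 : List String} (p q : String → Bool)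
    (h1 : l1.Nodup) (h2 : l2.Nodup)
    (h : ∀ k, (k ∈ l1 ∧ p k = true) ↔ (k ∈ l2 ∧ q k = true)) :
    (l1.filter p).length = (l2.filter q).length := by
  apply List.Perm.length_eq
  apply (List.perm_ext_iff_of_nodup (h1.filter p) (h2.filter q)).mpr
  intro k
  simp only [List.mem_filter]
  exact h k

-- ===== VERDICT (by name: the statement is the Claim_ definition above) =====
theorem get_env_changes_summary_py_spec : Claim_equal_get_env_changes_summary_py := by
  intro c f o _ hpre
  obtain ⟨hc, hf⟩ := hpre
  unfold Spec_get_env_changes_summary_py get_env_changes_summary_py get_env_changes_summary_py_alt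
  dsimp only
  rw [foldl_tally]
  have hkeysc : (PySem.Dict.mk c).keys = c.map Prod.fst := by simp [PySem.Dict.keys_mk]
  have hkeysf : (PySem.Dict.mk f).keys = f.map Prod.fst := by simp [PySem.Dict.keys_mk]
  -- common-key count, seen from f and from c
  have hcommon :
      ((f.map Prod.fst).filter (fun k => (PySem.Dict.mk c).contains k)).length
      = ((c.map Prod.fst).filter (fun k => (PySem.Dict.mk f).contains k)).length := by
    apply length_filter_eq_of_nodup _ _ hf hc
    intro k
    simp only [contains_mk_eq, decide_eq_true_iff]
    tauto
  -- removed count over the pair list = over the key list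
  have hremoved :
      (c.filter (fun kv => !((PySem.Dict.mk f).contains kv.1))).length
      = ((c.map Prod.fst).filter (fun k => !((PySem.Dict.mk f).contains k))).length := by
    exact length_filter_fst c (fun k => !((PySem.Dict.mk f).contains k))
  have hcommc :
      (c.filter (fun kv => (PySem.Dict.mk f).contains kv.1)).length
      = ((c.map Prod.fst).filter (fun k => (PySem.Dict.mk f).contains k)).length := by
    exact length_filter_fst c (fun k => (PySem.Dict.mk f).contains k)
  -- new: len f = A's new + common, len c = removed + common
  have hsplitf :
      ((f.map Prod.fst).filter (fun k => (PySem.Dict.mk c).contains k)).length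
      + ((f.map Prod.fst).filter (fun k => !((PySem.Dict.mk c).contains k))).length
      = f.length := by
    rw [show f.length = (f.map Prod.fst).length from (List.length_map _).symm]
    simpa using (List.length_eq_length_filter_add (l := f.map Prod.fst)
      (fun k => (PySem.Dict.mk c).contains k)).symm
  have hsplitc :
      (c.filter (fun kv => (PySem.Dict.mk f).contains kv.1)).length
      + (c.filter (fun kv => !((PySem.Dict.mk f).contains kv.1))).length
      = c.length := by
    simpa using (List.length_eq_length_filter_add (l := c)
      (fun kv => (PySem.Dict.mk f).contains kv.1)).symm
  -- updated: identical multisets of keys counted from either side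
  have hupd :
      ((f.map Prod.fst).filter (fun k =>
        (PySem.Dict.mk c).contains k
        && !((PySem.Dict.mk c).getD k "" == (PySem.Dict.mk f).getD k ""))).length
      = (c.filter (fun kv =>
          (PySem.Dict.mk f).contains kv.1
          && !((PySem.Dict.mk f).getD kv.1 "" == kv.2))).length := by
    have hstep :
        (c.filter (fun kv =>
          (PySem.Dict.mk f).contains kv.1
          && !((PySem.Dict.mk f).getD kv.1 "" == kv.2))).length
        = ((c.map Prod.fst).filter (fun k =>
            (PySem.Dict.mk f).contains k
            && !((PySem.Dict.mk f).getD k "" == (PySem.Dict.mk c).getD k ""))).length := by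
      have hcongr : c.filter (fun kv =>
          (PySem.Dict.mk f).contains kv.1
          && !((PySem.Dict.mk f).getD kv.1 "" == kv.2))
        = c.filter (fun kv =>
          (PySem.Dict.mk f).contains kv.1
          && !((PySem.Dict.mk f).getD kv.1 "" == (PySem.Dict.mk c).getD kv.1 "")) := by
        apply List.filter_congr
        intro kv hkv
        have hv : (PySem.Dict.mk c).getD kv.1 "" = kv.2 := by
          exact PySem.Dict.getD_of_mem_items (d := PySem.Dict.mk c)
            (by simpa using hkv) (by simpa [hkeysc] using hc) ""
        rw [hv]
      rw [hcongr]
      exact length_filter_fst c (fun k =>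
        (PySem.Dict.mk f).contains k
        && !((PySem.Dict.mk f).getD k "" == (PySem.Dict.mk c).getD k ""))
    rw [hstep]
    apply length_filter_eq_of_nodup _ _ hf hc
    intro k
    simp only [contains_mk_eq, decide_eq_true_iff, Bool.and_eq_true, Bool.not_eq_true',
      beq_eq_false_iff_ne, ne_eq]
    constructor
    · rintro ⟨hkf, hkc, hne⟩
      exact ⟨hkc, hkf, fun h => hne h.symm⟩
    · rintro ⟨hkc, hkf, hne⟩
      exact ⟨hkf, hkc, fun h => hne h.symm⟩
  -- assemble the four entries
  simp only [hkeysc, hkeysf]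
  have e1 :
      (((f.map Prod.fst).filter (fun k => !((PySem.Dict.mk c).contains k))).length : Int)
      = (f.length : Int) - ((c.length : Int)
          - (0 + ((c.filter (fun kv => !((PySem.Dict.mk f).contains kv.1))).length : Int))) := by
    omega
  have e2 :
      (((f.map Prod.fst).filter (fun k =>
        (PySem.Dict.mk c).contains k
        && !((PySem.Dict.mk c).getD k "" == (PySem.Dict.mk f).getD k ""))).length : Int)
      = 0 + ((c.filter (fun kv =>
          (PySem.Dict.mk f).contains kv.1
          && !((PySem.Dict.mk f).getD kv.1 "" == kv.2))).length : Int) := by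
    rw [hupd]; ring
  have e3 :
      (((c.map Prod.fst).filter (fun k => !((PySem.Dict.mk f).contains k))).length : Int)
      = 0 + ((c.filter (fun kv => !((PySem.Dict.mk f).contains kv.1))).length : Int) := by
    omega
  rw [e1, e2, e3]
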